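-- pv_equiv track=rewrite | github.com/bwdpaepe/dodona | oefening6.py | samenvoegen
-- ===== SOURCE A (Python) =====
-- def samenvoegen(glijbanen, ladders):
--     try:
--         samengevoegd = {}
--         dubbel = checkDubbel(glijbanen, ladders)
--         glijbanenOK = checkGlijbanen(glijbanen)
--         laddersOK = checkLadders(ladders)
--         if dubbel or checkGlijbanen(glijbanen) or checkLadders(ladders):
--             raise AssertionError('ongeldige opstelling')
--         for k,v in glijbanen.items():
--             samengevoegd[k] = (k - v) * -1
--         for k,v in ladders.items():
--             samengevoegd[k] = v - k
--         return samengevoegd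
--     except AssertionError:
--         raise
--
-- def checkDubbel(glijbanen, ladders):
--     glijbanenSet = set(glijbanen)
--     laddersSet = set(ladders)
--     return glijbanenSet & laddersSet
--
-- def checkGlijbanen(glijbanen):
--     for k, v in glijbanen.items():
--         if v >= k:
--             return True
--     return False
--
-- def checkLadders(ladders):
--     for k, v in ladders.items():
--         if k >= v:
--             return True
--     return False
-- ===== SOURCE B (Python) =====
-- def samenvoegen(glijbanen, ladders):
--     gkeys = set(glijbanen)
--     samengevoegd = {}
--     for k, v in glijbanen.items():
--         if v >= k:
--             raise AssertionError('ongeldige opstelling')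
--         samengevoegd[k] = v - k
--     for k, v in ladders.items():
--         if k in gkeys or k >= v:
--             raise AssertionError('ongeldige opstelling')
--         samengevoegd[k] = v - k
--     return samengevoegd
-- ===== Notes on version B (the rewrite author's own statement) =====
-- stated objective: simpler
-- what changed: Replaces A's three separate validation helpers (set intersection plus two re-run check scans) and two build loops with two fused validate-and-build passes, one per dict, using a one-time key set.
import Mathlib
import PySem

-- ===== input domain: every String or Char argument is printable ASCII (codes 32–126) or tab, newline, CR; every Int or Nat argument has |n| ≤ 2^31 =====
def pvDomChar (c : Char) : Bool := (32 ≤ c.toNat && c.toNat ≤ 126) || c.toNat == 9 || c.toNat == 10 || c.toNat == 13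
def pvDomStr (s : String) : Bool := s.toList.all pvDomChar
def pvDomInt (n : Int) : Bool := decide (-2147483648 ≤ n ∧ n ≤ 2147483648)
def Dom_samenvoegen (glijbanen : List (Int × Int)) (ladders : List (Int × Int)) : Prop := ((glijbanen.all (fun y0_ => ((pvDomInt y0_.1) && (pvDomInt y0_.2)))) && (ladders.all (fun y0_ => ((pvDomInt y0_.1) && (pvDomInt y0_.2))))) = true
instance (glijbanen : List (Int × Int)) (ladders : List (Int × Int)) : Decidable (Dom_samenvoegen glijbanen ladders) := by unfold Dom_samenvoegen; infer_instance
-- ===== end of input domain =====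

-- B fuses A's three validation helpers and two build loops into two validate-and-build passes (simpler decomposition).
-- Pre_ excludes exactly the inputs on which A raises AssertionError ('ongeldige opstelling'); B raises there too.


-- ===== PORT A =====
def checkDubbel (glijbanen ladders : List (Int × Int)) : PySem.Set Int :=
  PySem.Set.inter (PySem.Set.ofList (glijbanen.map (·.1))) (PySem.Set.ofList (ladders.map (·.1)))

def checkGlijbanen (glijbanen : List (Int × Int)) : Bool :=
  glijbanen.any (fun kv => kv.2 ≥ kv.1)

def checkLadders (ladders : List (Int × Int)) : Bool :=
  ladders.any (fun kv => kv.1 ≥ kv.2)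

def samenvoegen (glijbanen : List (Int × Int)) (ladders : List (Int × Int)) : List (Int × Int) :=
  let dubbel := checkDubbel glijbanen ladders
  let _glijbanenOK := checkGlijbanen glijbanen
  let _laddersOK := checkLadders ladders
  if !dubbel.isEmpty || checkGlijbanen glijbanen || checkLadders ladders then
    []  -- 'raise AssertionError' path; excluded by Pre_samenvoegen
  else
    let d1 := glijbanen.foldl (fun d kv => d.insert kv.1 ((kv.1 - kv.2) * (-1))) PySem.Dict.empty
    let d2 := ladders.foldl (fun d kv => d.insert kv.1 (kv.2 - kv.1)) d1
    d2.items

-- ===== PORT B =====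
def altGlij : List (Int × Int) → PySem.Dict Int Int → Option (PySem.Dict Int Int)
  | [], d => some d
  | (k, v) :: rest, d =>
    if v ≥ k then none  -- raise; excluded by Pre_samenvoegen
    else altGlij rest (d.insert k (v - k))

def altLad (gkeys : PySem.Set Int) : List (Int × Int) → PySem.Dict Int Int → Option (PySem.Dict Int Int)
  | [], d => some d
  | (k, v) :: rest, d =>
    if gkeys.contains k || k ≥ v then none  -- raise; excluded by Pre_samenvoegen
    else altLad gkeys rest (d.insert k (v - k))

def samenvoegen_alt (glijbanen : List (Int × Int)) (ladders : List (Int × Int)) : List (Int × Int) :=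
  let gkeys := PySem.Set.ofList (glijbanen.map (·.1))
  match altGlij glijbanen PySem.Dict.empty with
  | none => []
  | some d =>
    match altLad gkeys ladders d with
    | none => []
    | some d2 => d2.items

-- ===== PRECONDITION & SPEC =====
-- Pre_ excludes exactly the inputs on which A raises AssertionError: an overlapping key,
-- a glijbaan with v ≥ k, or a ladder with k ≥ v.
def Pre_samenvoegen (glijbanen : List (Int × Int)) (ladders : List (Int × Int)) : Prop :=
  (∀ p ∈ glijbanen, p.2 < p.1) ∧ (∀ p ∈ ladders, p.1 < p.2) ∧
  (∀ p ∈ glijbanen, p.1 ∉ ladders.map (·.1))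
instance (glijbanen : List (Int × Int)) (ladders : List (Int × Int)) : Decidable (Pre_samenvoegen glijbanen ladders) := by unfold Pre_samenvoegen; infer_instance

def pvWitness_samenvoegen : (List (Int × Int)) × (List (Int × Int)) := ([(3, 1), (7, 2)], [(2, 5)])

def Spec_samenvoegen (glijbanen : List (Int × Int)) (ladders : List (Int × Int)) (out : List (Int × Int)) : Prop := out = samenvoegen_alt glijbanen ladders
instance (glijbanen : List (Int × Int)) (ladders : List (Int × Int)) (out : List (Int × Int)) : Decidable (Spec_samenvoegen glijbanen ladders out) := by unfold Spec_samenvoegen; infer_instance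

-- ===== CLAIM (what is proved, stated in full; the proofs are below) =====
def Claim_equal_samenvoegen : Prop := ∀ (glijbanen : List (Int × Int)) (ladders : List (Int × Int)), Dom_samenvoegen glijbanen ladders → Pre_samenvoegen glijbanen ladders → Spec_samenvoegen glijbanen ladders (samenvoegen glijbanen ladders)

-- ===== LEMMAS AND PROOFS =====

theorem altGlij_ok (g : List (Int × Int)) (d : PySem.Dict Int Int)
    (h : ∀ p ∈ g, p.2 < p.1) :
    altGlij g d = some (g.foldl (fun d kv => d.insert kv.1 ((kv.1 - kv.2) * (-1))) d) := by
  induction g generalizing d with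
  | nil => rfl
  | cons kv rest ih =>
    obtain ⟨k, v⟩ := kv
    have hk : v < k := h (k, v) (by simp)
    simp only [altGlij, List.foldl_cons]
    rw [if_neg (not_le.mpr hk), show (v - k) = (k - v) * (-1) by ring]
    exact ih _ (fun p hp => h p (List.mem_cons_of_mem _ hp))

theorem altLad_ok (gkeys : PySem.Set Int) (l : List (Int × Int)) (d : PySem.Dict Int Int)
    (h : ∀ p ∈ l, p.1 < p.2) (hdisj : ∀ p ∈ l, gkeys.contains p.1 = false) :
    altLad gkeys l d = some (l.foldl (fun d kv => d.insert kv.1 (kv.2 - kv.1)) d) := by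
  induction l generalizing d with
  | nil => rfl
  | cons kv rest ih =>
    obtain ⟨k, v⟩ := kv
    have hk : k < v := h (k, v) (by simp)
    have hc : gkeys.contains k = false := hdisj (k, v) (by simp)
    simp only [altLad, List.foldl_cons]
    rw [if_neg ?hguard]
    case hguard => simp only [hc, Bool.false_or, decide_eq_true_eq]; omega
    exact ih _ (fun p hp => h p (List.mem_cons_of_mem _ hp))
      (fun p hp => hdisj p (List.mem_cons_of_mem _ hp))

theorem checkDubbel_empty (g l : List (Int × Int))
    (hdisj : ∀ p ∈ g, p.1 ∉ l.map (·.1)) :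
    checkDubbel g l = [] := by
  unfold checkDubbel
  rw [List.eq_nil_iff_forall_not_mem]
  intro x hx
  have hx' := (PySem.Set.mem_inter _ _ _).mp hx
  have h1 : x ∈ g.map (·.1) := (PySem.Set.mem_ofList _ _).mp hx'.1
  have h2 : x ∈ l.map (·.1) := (PySem.Set.mem_ofList _ _).mp hx'.2
  obtain ⟨p, hp, rfl⟩ := List.mem_map.mp h1
  exact hdisj p hp h2

theorem samenvoegen_spec : Claim_equal_samenvoegen := by
  intro g l _ hpre
  obtain ⟨hg, hl, hdisj⟩ := hpre
  unfold Spec_samenvoegen samenvoegen samenvoegen_alt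
  have hdub : checkDubbel g l = [] := checkDubbel_empty g l hdisj
  have hcg : checkGlijbanen g = false := by
    simp only [checkGlijbanen, List.any_eq_false]
    intro p hp; have := hg p hp; simp; omega
  have hcl : checkLadders l = false := by
    simp only [checkLadders, List.any_eq_false]
    intro p hp; have := hl p hp; simp; omega
  have hdisj' : ∀ p ∈ l, (PySem.Set.ofList (g.map (·.1))).contains p.1 = false := by
    intro p hp
    rw [Bool.eq_false_iff]
    intro hc
    have hm : p.1 ∈ g.map (·.1) :=
      (PySem.Set.mem_ofList _ _).mp ((PySem.Set.contains_iff _ _).mp hc)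
    obtain ⟨q, hq, hq1⟩ := List.mem_map.mp hm
    exact hdisj q hq (hq1 ▸ List.mem_map.mpr ⟨p, hp, rfl⟩)
  rw [altGlij_ok g PySem.Dict.empty hg]
  simp only [hdub, hcg, hcl, List.isEmpty_nil, Bool.or_self, Bool.or_false, Bool.not_true]
  rw [altLad_ok _ l _ hl hdisj']
  rfl
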